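-- pv_equiv track=rewrite | github.com/xwxing1229/LeetCode | Python3/2178_maximum_split_of_positive_even_integers.py | maximumEvenSplit
-- ===== SOURCE A (Python) =====
-- def maximumEvenSplit(finalSum):
--     """
--     Inputs:
--         finalSum: int
--     Outputs:
--         res: list[int]
--     """
--     res = []
--     if finalSum % 2 == 1:
--         return res
--     cur = 2
--     while finalSum > 0:
--         res.append(cur)
--         finalSum -= cur
--         cur += 2
--         if finalSum < cur:
--             res[-1] += finalSum
--             finalSum = 0
--     return res
-- ===== SOURCE B (Python) =====
-- def maximumEvenSplit(finalSum):
--     # Derive the number of terms arithmetically (binary search for the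
--     # largest n with n*(n+1) <= finalSum) instead of iterative subtraction.
--     if finalSum <= 0 or finalSum % 2 == 1:
--         return []
--     lo, hi = 1, finalSum
--     while lo < hi:
--         mid = (lo + hi + 1) // 2
--         if mid * (mid + 1) <= finalSum:
--             lo = mid
--         else:
--             hi = mid - 1
--     n = lo
--     res = list(range(2, 2 * n + 1, 2))
--     res[-1] += finalSum - n * (n + 1)
--     return res
-- ===== Notes on version B (the rewrite author's own statement) =====
-- stated objective: alternative
-- what changed: A discovers the terms by iterative subtraction (append 2,4,6,... until the remainder is too small, then absorb it into the last term); B derives the number of terms n arithmetically as the largest n with n*(n+1) <= finalSum via binary search, builds the list in one range construction and adds the leftover to the last element.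
import Mathlib
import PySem

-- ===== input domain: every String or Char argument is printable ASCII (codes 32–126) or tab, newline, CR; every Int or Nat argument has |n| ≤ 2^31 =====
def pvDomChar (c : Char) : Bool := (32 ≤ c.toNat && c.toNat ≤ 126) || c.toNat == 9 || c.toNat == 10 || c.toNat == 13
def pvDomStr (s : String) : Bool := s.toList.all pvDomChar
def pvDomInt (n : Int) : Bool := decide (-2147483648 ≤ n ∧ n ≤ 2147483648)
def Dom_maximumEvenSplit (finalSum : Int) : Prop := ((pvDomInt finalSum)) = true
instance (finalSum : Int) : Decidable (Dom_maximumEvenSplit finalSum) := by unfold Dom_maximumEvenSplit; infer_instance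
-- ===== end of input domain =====

-- B replaces A's iterative subtraction loop by an arithmetic derivation of the
-- term count (binary search for the largest n with n*(n+1) ≤ finalSum), then
-- builds the answer in one range construction; objective: alternative algorithm.

-- ===== PORT A =====
-- while finalSum > 0: res.append(cur); finalSum -= cur; cur += 2;
--   if finalSum < cur: res[-1] += finalSum; finalSum = 0
def pvALoop (res : List Int) (finalSum cur : Int) : List Int :=
  if 0 < finalSum then
    let res' := res ++ [cur]
    let fs' := finalSum - cur
    let cur' := cur + 2
    if fs' < cur' then res'.dropLast ++ [res'.getLastD 0 + fs']
    else pvALoop res' fs' cur'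
  else res
termination_by ((2 - cur).toNat, finalSum.toNat)
decreasing_by
  by_cases h2 : cur < 2
  · exact Prod.Lex.left _ _ (by omega)
  · have e : (2 - (cur + 2)).toNat = (2 - cur).toNat := by omega
    rw [e]
    exact Prod.Lex.right _ (by omega)

def maximumEvenSplit (finalSum : Int) : List Int :=
  let res : List Int := []
  if PySem.Int.mod finalSum 2 == 1 then res
  else pvALoop res finalSum 2

-- ===== PORT B =====
-- binary search: largest n in [lo, hi] with n*(n+1) <= finalSum
def pvBSearch (finalSum lo hi : Int) : Int :=
  if lo < hi then
    let mid := PySem.Int.floordiv (lo + hi + 1) 2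
    if mid * (mid + 1) ≤ finalSum then pvBSearch finalSum mid hi
    else pvBSearch finalSum lo (mid - 1)
  else lo
termination_by (hi - lo).toNat
decreasing_by
  · have h := PySem.Int.floordiv_two_mid_bounds (lo := lo + 1) (hi := hi) (by omega)
    have e : lo + 1 + hi = lo + hi + 1 := by ring
    rw [e] at h
    omega
  · have h := PySem.Int.floordiv_two_mid_bounds (lo := lo + 1) (hi := hi) (by omega)
    have e : lo + 1 + hi = lo + hi + 1 := by ring
    rw [e] at h
    omega

def maximumEvenSplit_alt (finalSum : Int) : List Int :=
  if finalSum ≤ 0 || PySem.Int.mod finalSum 2 == 1 then []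
  else
    let n := pvBSearch finalSum 1 finalSum
    let res := PySem.List.pyRange 2 (2 * n + 1) 2
    res.dropLast ++ [res.getLastD 0 + (finalSum - n * (n + 1))]

-- ===== PRECONDITION & SPEC =====
def Spec_maximumEvenSplit (finalSum : Int) (out : List Int) : Prop := out = maximumEvenSplit_alt finalSum
instance (finalSum : Int) (out : List Int) : Decidable (Spec_maximumEvenSplit finalSum out) := by unfold Spec_maximumEvenSplit; infer_instance

-- ===== CLAIM (what is proved, stated in full; the proofs are below) =====
def Claim_equal_maximumEvenSplit : Prop := ∀ (finalSum : Int), Dom_maximumEvenSplit finalSum → Spec_maximumEvenSplit finalSum (maximumEvenSplit finalSum)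

-- ===== LEMMAS AND PROOFS =====

-- the accumulator of A's loop is a prefix that passes through unchanged
theorem pvALoop_append (res : List Int) (finalSum cur : Int) :
    ∀ pre : List Int, pvALoop (pre ++ res) finalSum cur = pre ++ pvALoop res finalSum cur := by
  induction res, finalSum, cur using pvALoop.induct with
  | case1 res s c hpos fs' cur' habs =>
    intro pre
    have habs' : s - c < c + 2 := habs
    rw [pvALoop, pvALoop]
    simp only [if_pos hpos, if_pos habs']
    simp only [List.dropLast_concat, List.getLastD_concat]
    simp only [List.append_assoc]
  | case2 res s c hpos res' fs' cur' habs ih =>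
    intro pre
    have habs' : ¬ s - c < c + 2 := habs
    have ih' : ∀ pre : List Int, pvALoop (pre ++ (res ++ [c])) (s - c) (c + 2) =
        pre ++ pvALoop (res ++ [c]) (s - c) (c + 2) := ih
    rw [pvALoop, pvALoop]
    simp only [if_pos hpos, if_neg habs']
    rw [List.append_assoc]
    exact ih' pre
  | case3 res s c hpos =>
    intro pre
    rw [pvALoop, pvALoop]
    simp [if_neg hpos]

-- characterisation of A's loop: with cur = 2*j and k+1 further terms fitting,
-- it emits 2j, 2(j+1), …, 2(j+k-1) and absorbs the leftover into 2(j+k)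
theorem pvALoop_char : ∀ (k : Nat) (j s : Int), 1 ≤ j →
    2 * ((k : Int) + 1) * j + (k : Int) * ((k : Int) + 1) ≤ s →
    s < 2 * ((k : Int) + 2) * j + ((k : Int) + 1) * ((k : Int) + 2) →
    pvALoop [] s (2 * j) =
      ((List.range k).map (fun i : Nat => 2 * (j + (i : Int)))) ++
        [2 * (j + (k : Int)) + (s - (2 * ((k : Int) + 1) * j + (k : Int) * ((k : Int) + 1)))] := by
  intro k
  induction k with
  | zero =>
    intro j s hj hlo hhi
    push_cast at hlo hhi ⊢
    have hs : 0 < s := by nlinarith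
    have habs : s - 2 * j < 2 * j + 2 := by nlinarith
    rw [pvALoop]
    simp only [if_pos hs, if_pos habs, List.nil_append, List.range_zero, List.map_nil,
      show ([2 * j] : List Int).dropLast = [] from rfl,
      show ([2 * j] : List Int).getLastD 0 = 2 * j from rfl]
    congr 1
    ring
  | succ k ih =>
    intro j s hj hlo hhi
    push_cast at hlo hhi ⊢
    have hk0 : (0 : Int) ≤ (k : Int) := Int.natCast_nonneg k
    have hs : 0 < s := by nlinarith
    have habs : ¬ (s - 2 * j < 2 * j + 2) := by nlinarith
    rw [pvALoop]
    simp only [if_pos hs, if_neg habs, List.nil_append]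
    have e2 : 2 * j + 2 = 2 * (j + 1) := by ring
    rw [e2]
    have hacc := pvALoop_append [] (s - 2 * j) (2 * (j + 1)) [2 * j]
    simp only [List.append_nil] at hacc
    rw [hacc]
    have hlo' : 2 * ((k : Int) + 1) * (j + 1) + (k : Int) * ((k : Int) + 1) ≤ s - 2 * j := by
      nlinarith
    have hhi' : s - 2 * j < 2 * ((k : Int) + 2) * (j + 1) + ((k : Int) + 1) * ((k : Int) + 2) := by
      nlinarith
    rw [ih (j + 1) (s - 2 * j) (by omega) hlo' hhi']
    rw [List.range_succ_eq_map, List.map_cons, List.map_map, List.cons_append]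
    simp only [List.nil_append]
    congr 1
    · norm_num
    congr 1
    · apply List.map_congr_left
      intro i _
      simp only [Function.comp_apply, Nat.succ_eq_add_one]
      push_cast
      ring
    · congr 1
      ring

-- binary-search correctness: pvBSearch returns the largest n with n*(n+1) ≤ s
theorem pvBSearch_char (s : Int) : ∀ (lo hi : Int), lo ≤ hi → lo * (lo + 1) ≤ s →
    s < (hi + 1) * (hi + 2) →
    lo ≤ pvBSearch s lo hi ∧
      pvBSearch s lo hi * (pvBSearch s lo hi + 1) ≤ s ∧
      s < (pvBSearch s lo hi + 1) * (pvBSearch s lo hi + 2) := by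
  intro lo hi
  induction lo, hi using pvBSearch.induct s with
  | case1 lo hi hlt mid hcond ih =>
    intro _ hlo hhi
    have hcond' : PySem.Int.floordiv (lo + hi + 1) 2 *
        (PySem.Int.floordiv (lo + hi + 1) 2 + 1) ≤ s := hcond
    have ih' : PySem.Int.floordiv (lo + hi + 1) 2 ≤ hi →
        PySem.Int.floordiv (lo + hi + 1) 2 * (PySem.Int.floordiv (lo + hi + 1) 2 + 1) ≤ s →
        s < (hi + 1) * (hi + 2) →
        PySem.Int.floordiv (lo + hi + 1) 2 ≤ pvBSearch s (PySem.Int.floordiv (lo + hi + 1) 2) hi ∧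
          pvBSearch s (PySem.Int.floordiv (lo + hi + 1) 2) hi *
              (pvBSearch s (PySem.Int.floordiv (lo + hi + 1) 2) hi + 1) ≤ s ∧
          s < (pvBSearch s (PySem.Int.floordiv (lo + hi + 1) 2) hi + 1) *
              (pvBSearch s (PySem.Int.floordiv (lo + hi + 1) 2) hi + 2) := ih
    have hmid := PySem.Int.floordiv_two_mid_bounds (lo := lo + 1) (hi := hi) (by omega)
    have e : lo + 1 + hi = lo + hi + 1 := by ring
    rw [e] at hmid
    rw [pvBSearch]
    simp only [if_pos hlt, if_pos hcond']
    have h := ih' (by omega) hcond' hhi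
    exact ⟨by omega, h.2.1, h.2.2⟩
  | case2 lo hi hlt mid hcond ih =>
    intro _ hlo hhi
    have hcond' : ¬ PySem.Int.floordiv (lo + hi + 1) 2 *
        (PySem.Int.floordiv (lo + hi + 1) 2 + 1) ≤ s := hcond
    have ih' : lo ≤ PySem.Int.floordiv (lo + hi + 1) 2 - 1 →
        lo * (lo + 1) ≤ s →
        s < (PySem.Int.floordiv (lo + hi + 1) 2 - 1 + 1) *
            (PySem.Int.floordiv (lo + hi + 1) 2 - 1 + 2) →
        lo ≤ pvBSearch s lo (PySem.Int.floordiv (lo + hi + 1) 2 - 1) ∧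
          pvBSearch s lo (PySem.Int.floordiv (lo + hi + 1) 2 - 1) *
              (pvBSearch s lo (PySem.Int.floordiv (lo + hi + 1) 2 - 1) + 1) ≤ s ∧
          s < (pvBSearch s lo (PySem.Int.floordiv (lo + hi + 1) 2 - 1) + 1) *
              (pvBSearch s lo (PySem.Int.floordiv (lo + hi + 1) 2 - 1) + 2) := ih
    have hmid := PySem.Int.floordiv_two_mid_bounds (lo := lo + 1) (hi := hi) (by omega)
    have e : lo + 1 + hi = lo + hi + 1 := by ring
    rw [e] at hmid
    rw [pvBSearch]
    simp only [if_pos hlt, if_neg hcond']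
    have hgt : s < PySem.Int.floordiv (lo + hi + 1) 2 *
        (PySem.Int.floordiv (lo + hi + 1) 2 + 1) := lt_of_not_ge hcond'
    have e3 : (PySem.Int.floordiv (lo + hi + 1) 2 - 1 + 1) *
        (PySem.Int.floordiv (lo + hi + 1) 2 - 1 + 2) =
        PySem.Int.floordiv (lo + hi + 1) 2 * (PySem.Int.floordiv (lo + hi + 1) 2 + 1) := by
      ring
    exact ih' (by omega) hlo (by rw [e3]; exact hgt)
  | case3 lo hi hlt =>
    intro hle hlo hhi
    rw [pvBSearch]
    simp only [if_neg hlt]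
    have : lo = hi := by omega
    subst this
    exact ⟨le_refl _, hlo, hhi⟩

-- ===== VERDICT (by name: the statement is the Claim_ definition above) =====
theorem maximumEvenSplit_spec : Claim_equal_maximumEvenSplit := by
  intro finalSum _
  unfold Spec_maximumEvenSplit maximumEvenSplit maximumEvenSplit_alt
  have hm : PySem.Int.mod finalSum 2 = finalSum % 2 :=
    PySem.Int.mod_eq_emod_of_pos (by norm_num)
  rw [hm]
  simp only [beq_iff_eq, Bool.or_eq_true, decide_eq_true_eq]
  by_cases hodd : finalSum % 2 = 1
  · simp [hodd]
  · by_cases hpos : finalSum ≤ 0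
    · rw [if_neg hodd, if_pos (by omega), pvALoop]
      simp [show ¬ (0 : Int) < finalSum by omega]
    · have h2 : 2 ≤ finalSum := by omega
      rw [if_neg hodd, if_neg (by omega)]
      set n := pvBSearch finalSum 1 finalSum with hn
      have hchar := pvBSearch_char finalSum 1 finalSum (by omega) (by omega) (by nlinarith)
      rw [← hn] at hchar
      obtain ⟨hn1, hnlo, hnhi⟩ := hchar
      set k := (n - 1).toNat with hkdef
      have hk : (k : Int) = n - 1 := by omega
      have hA := pvALoop_char k 1 finalSum (le_refl 1)
        (by rw [hk]
            have e : 2 * ((n - 1) + 1) * 1 + (n - 1) * ((n - 1) + 1) = n * (n + 1) := by ring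
            rw [e]; exact hnlo)
        (by rw [hk]
            have e : 2 * ((n - 1) + 2) * 1 + ((n - 1) + 1) * ((n - 1) + 2) =
              (n + 1) * (n + 2) := by ring
            rw [e]; exact hnhi)
      rw [show (2 : Int) * 1 = 2 by norm_num] at hA
      rw [hA]
      have hrange : PySem.List.pyRange 2 (2 * n + 1) 2 =
          (List.range (k + 1)).map (fun i : Nat => 2 + 2 * (i : Int)) := by
        rw [PySem.List.pyRange_of_pos _ _ (by norm_num)]
        rw [if_pos (by omega : (2 : Int) < 2 * n + 1)]
        have hcnt : ((2 * n + 1 - 2 + 2 - 1) / 2).toNat = k + 1 := by omega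
        rw [hcnt]
      rw [hrange, List.range_succ, List.map_append, List.map_singleton,
        List.dropLast_concat, List.getLastD_concat]
      congr 1
      · apply List.map_congr_left
        intro i _
        ring
      · rw [hk]
        ring
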